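-- pv_equiv track=rewrite | github.com/MAXEUR5/evidetective-artifacts | HypD_master/Core/Algorithm.py | _filter_max_coverage_propagations
-- ===== SOURCE A (Python) =====
-- def _filter_max_coverage_propagations(propagation_list):
--
--     chains = [tuple(obj.get("call_chain") or []) for obj in propagation_list]
--     keep_idx = set(range(len(chains)))
--
--     for i, ci in enumerate(chains):
--         if not ci:
--             continue
--         for j, cj in enumerate(chains):
--             if i == j:
--                 continue
--             if len(ci) < len(cj) and cj[:len(ci)] == ci:
--                 if i in keep_idx:
--                     keep_idx.remove(i)
--                 break
--
--     return [propagation_list[i] for i in range(len(propagation_list)) if i in keep_idx]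
-- ===== SOURCE B (Python) =====
-- def _filter_max_coverage_propagations(propagation_list):
--     chains = [tuple(obj.get("call_chain") or []) for obj in propagation_list]
--     # one pass: collect every proper (nonempty) prefix of every chain in a hash set
--     prefixes = set()
--     for c in chains:
--         for k in range(1, len(c)):
--             prefixes.add(c[:k])
--     # keep an object iff its chain is empty or is not a strict prefix of any chain
--     return [obj for obj, c in zip(propagation_list, chains) if not c or c not in prefixes]
-- ===== Notes on version B (the rewrite author's own statement) =====
-- stated objective: alternative
-- what changed: Replaces the all-pairs strict-prefix scan with one pass that inserts every proper prefix of every chain into a hash set and then keeps a chain iff it is empty or absent from that set.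
import Mathlib
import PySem

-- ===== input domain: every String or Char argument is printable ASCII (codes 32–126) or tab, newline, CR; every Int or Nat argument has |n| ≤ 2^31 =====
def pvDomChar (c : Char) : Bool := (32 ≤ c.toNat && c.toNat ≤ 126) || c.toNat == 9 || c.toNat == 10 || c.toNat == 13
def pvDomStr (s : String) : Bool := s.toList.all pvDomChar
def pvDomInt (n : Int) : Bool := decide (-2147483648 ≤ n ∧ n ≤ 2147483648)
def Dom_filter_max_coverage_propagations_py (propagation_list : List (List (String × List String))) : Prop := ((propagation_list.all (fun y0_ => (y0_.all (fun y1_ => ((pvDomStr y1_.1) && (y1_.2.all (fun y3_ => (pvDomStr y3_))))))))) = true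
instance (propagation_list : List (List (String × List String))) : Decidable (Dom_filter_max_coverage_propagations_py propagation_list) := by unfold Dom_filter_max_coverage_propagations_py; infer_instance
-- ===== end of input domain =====

-- B replaces A's all-pairs strict-prefix scan by one pass that collects every proper
-- prefix of every chain into a set and keeps a chain iff it is empty or not in that set
-- (objective: alternative - a different algorithm of comparable measured cost).

-- ===== PORT A =====

-- obj.get("call_chain") or []: a missing key gives [], and an empty value is falsy so 'or' gives [] — both are getD's default/value
def pvChain (obj : List (String × List String)) : List String :=
  (PySem.Dict.mk obj).getD "call_chain" []

-- inner 'for j, cj in enumerate(chains): … break': removal happens iff SOME j satisfies the test (break only stops early)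
def pvA_any (i : Int) (ci : List String) (chains : List (List String)) : Bool :=
  (PySem.List.enumerate chains).any (fun jc =>
    decide (i ≠ jc.1) && decide (ci.length < jc.2.length) && (jc.2.take ci.length == ci))
    -- cj[:len(ci)] = take: the slice bound 0 ≤ len(ci) ≤ len(cj), where take is exact

-- one iteration of the outer for-loop over enumerate(chains)
def pvA_step (chains : List (List String)) (keep : PySem.Set Int) (ic : Int × List String) : PySem.Set Int :=
  if ic.2 = [] then keep
  else if pvA_any ic.1 ic.2 chains then PySem.Set.discard keep ic.1 else keep
    -- 'if i in keep_idx: keep_idx.remove(i)' = discard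

def filter_max_coverage_propagations_py (propagation_list : List (List (String × List String))) : List (List (String × List String)) :=
  let chains := propagation_list.map pvChain
  let keep_idx : PySem.Set Int := PySem.Set.ofList (PySem.List.pyRange 0 chains.length 1)
  let keep_idx := (PySem.List.enumerate chains).foldl (pvA_step chains) keep_idx
  (PySem.List.pyRange 0 propagation_list.length 1).filterMap (fun i =>
    if PySem.Set.contains keep_idx i then some (PySem.List.pyGetD propagation_list i []) else none)

-- ===== PORT B =====

-- prefixes: all proper nonempty prefixes of all chains (c[:k] for 1 ≤ k < len c; the slice is take, exact here)
def pvB_prefixes (chains : List (List String)) : PySem.Set (List String) :=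
  chains.foldl (fun s c =>
    (PySem.List.pyRange 1 c.length 1).foldl (fun s k => PySem.Set.add s (c.take k.toNat)) s)
    PySem.Set.empty

def filter_max_coverage_propagations_py_alt (propagation_list : List (List (String × List String))) : List (List (String × List String)) :=
  let chains := propagation_list.map pvChain
  let prefixes := pvB_prefixes chains
  (propagation_list.zip chains).filterMap (fun oc =>
    if oc.2 = [] ∨ ¬ PySem.Set.contains prefixes oc.2 then some oc.1 else none)

-- ===== PRECONDITION & SPEC =====
def Spec_filter_max_coverage_propagations_py (propagation_list : List (List (String × List String))) (out : List (List (String × List String))) : Prop := out = filter_max_coverage_propagations_py_alt propagation_list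
instance (propagation_list : List (List (String × List String))) (out : List (List (String × List String))) : Decidable (Spec_filter_max_coverage_propagations_py propagation_list out) := by unfold Spec_filter_max_coverage_propagations_py; infer_instance

-- ===== CLAIM (what is proved, stated in full; the proofs are below) =====
def Claim_equal_filter_max_coverage_propagations_py : Prop := ∀ (propagation_list : List (List (String × List String))), Dom_filter_max_coverage_propagations_py propagation_list → Spec_filter_max_coverage_propagations_py propagation_list (filter_max_coverage_propagations_py propagation_list)

-- ===== LEMMAS AND PROOFS =====

-- the value-level condition both programs test: c is a strict prefix of some chain
def pvStrict (c : List String) (chains : List (List String)) : Prop :=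
  ∃ cj ∈ chains, c.length < cj.length ∧ cj.take c.length = c

lemma pv_mem_enumerate {α : Type} (xs : List α) (s : Int) (ic : Int × α) :
    ic ∈ PySem.List.enumerate xs s ↔
      ∃ m : Nat, ∃ _ : m < xs.length, ic.1 = s + m ∧ ic.2 = xs[m] := by
  induction xs generalizing s with
  | nil => simp [PySem.List.enumerate_nil]
  | cons x xs ih =>
    rw [PySem.List.enumerate_cons]
    simp only [List.mem_cons, ih (s + 1), List.length_cons]
    constructor
    · rintro (rfl | ⟨m, hm, h1, h2⟩)
      · exact ⟨0, by omega, by simp, by simp⟩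
      · exact ⟨m + 1, by omega, by push_cast at h1 ⊢; omega, by simpa using h2⟩
    · rintro ⟨m, hm, h1, h2⟩
      cases m with
      | zero =>
        left
        rw [Prod.ext_iff]
        exact ⟨by simpa using h1, by simpa using h2⟩
      | succ m =>
        right
        exact ⟨m, by omega, by push_cast at h1 ⊢; omega, by simpa using h2⟩

-- ----- A side -----

lemma pv_fold_mem (chains l : List (List String)) (s : Int)
    (keep : PySem.Set Int) (x : Int) :
    x ∈ (PySem.List.enumerate l s).foldl (pvA_step chains) keep ↔
      x ∈ keep ∧ ∀ ic ∈ PySem.List.enumerate l s,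
        ic.2 ≠ [] → pvA_any ic.1 ic.2 chains = true → x ≠ ic.1 := by
  induction l generalizing s keep with
  | nil => simp [PySem.List.enumerate_nil]
  | cons c l ih =>
    rw [PySem.List.enumerate_cons]
    simp only [List.foldl_cons, List.forall_mem_cons, ih]
    by_cases hc : c = [] <;> by_cases ha : pvA_any s c chains = true <;>
      simp [pvA_step, hc, ha, PySem.Set.mem_discard]
    all_goals tauto

lemma pvA_any_iff (chains : List (List String)) (k : Nat) (hk : k < chains.length) :
    pvA_any (k : Int) (chains[k]'hk) chains = true ↔ pvStrict (chains[k]'hk) chains := by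
  unfold pvA_any pvStrict
  rw [List.any_eq_true]
  constructor
  · rintro ⟨jc, hjc, hp⟩
    simp only [Bool.and_eq_true, decide_eq_true_eq, beq_iff_eq] at hp
    rcases (pv_mem_enumerate chains 0 jc).1 hjc with ⟨m, hm, h1, h2⟩
    exact ⟨jc.2, by rw [h2]; exact List.getElem_mem _, hp.1.2, hp.2⟩
  · rintro ⟨cj, hcj, hlen, htake⟩
    rcases List.getElem_of_mem hcj with ⟨m, hm, rfl⟩
    by_cases hmk : m = k
    · subst hmk; exact absurd hlen (lt_irrefl _)
    · refine ⟨((m : Int), chains[m]'hm), ?_, ?_⟩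
      · exact (pv_mem_enumerate chains 0 _).2 ⟨m, hm, by simp, by simp⟩
      · simp only [Bool.and_eq_true, decide_eq_true_eq, beq_iff_eq]
        exact ⟨⟨by exact_mod_cast fun h => hmk (by omega), hlen⟩, htake⟩

lemma pv_keep_iff (pl : List (List (String × List String))) (k : Nat) (hk : k < pl.length) :
    ((k : Int) ∈ (PySem.List.enumerate (pl.map pvChain) 0).foldl (pvA_step (pl.map pvChain))
        (PySem.Set.ofList (PySem.List.pyRange 0 ((pl.map pvChain).length : Int) 1))) ↔
      (pvChain (pl[k]'hk) = [] ∨ ¬ pvStrict (pvChain (pl[k]'hk)) (pl.map pvChain)) := by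
  have hk' : k < (pl.map pvChain).length := by simpa using hk
  have hget : (pl.map pvChain)[k]'hk' = pvChain (pl[k]'hk) := by simp
  rw [pv_fold_mem]
  have h1 : (k : Int) ∈ PySem.Set.ofList (PySem.List.pyRange 0 ((pl.map pvChain).length : Int) 1) := by
    rw [PySem.Set.mem_ofList, PySem.List.mem_pyRange_one]
    constructor
    · exact_mod_cast Nat.zero_le k
    · exact_mod_cast hk'
  have h2 : (∀ ic ∈ PySem.List.enumerate (pl.map pvChain) 0,
        ic.2 ≠ [] → pvA_any ic.1 ic.2 (pl.map pvChain) = true → (k : Int) ≠ ic.1) ↔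
      ¬ ((pl.map pvChain)[k]'hk' ≠ [] ∧
          pvA_any (k : Int) ((pl.map pvChain)[k]'hk') (pl.map pvChain) = true) := by
    constructor
    · rintro h ⟨hne, ha⟩
      exact h ((k : Int), (pl.map pvChain)[k]'hk')
        ((pv_mem_enumerate _ _ _).2 ⟨k, hk', by simp, by simp⟩) hne ha rfl
    · intro h ic hic hne ha hkic
      rcases (pv_mem_enumerate _ _ _).1 hic with ⟨m, hm, hm1, hm2⟩
      have hkm : k = m := by omega
      subst hkm
      rw [hm2] at hne
      rw [hm2, ← hkic] at ha
      exact h ⟨hne, ha⟩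
  rw [h2, hget]
  by_cases hc : pvChain (pl[k]'hk) = []
  · simp [hc]
    exact hk
  · rw [← hget, pvA_any_iff (pl.map pvChain) k hk', hget]
    simp [hc]
    exact fun _ => hk

-- ----- B side -----

lemma pv_mem_prefAux (l : List (List String)) (s : PySem.Set (List String)) (y : List String) :
    y ∈ l.foldl (fun s c => (PySem.List.pyRange 1 (c.length : Int) 1).foldl
        (fun s k => PySem.Set.add s (c.take k.toNat)) s) s ↔
      y ∈ s ∨ ∃ c ∈ l, ∃ k : Int, (1 ≤ k ∧ k < (c.length : Int)) ∧ y = c.take k.toNat := by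
  induction l generalizing s with
  | nil => simp
  | cons c l ih =>
    simp only [List.foldl_cons, ih, PySem.Set.mem_foldl_add, List.exists_mem_cons_iff,
      PySem.List.mem_pyRange_one]
    exact or_assoc

lemma pvB_mem_iff (chains : List (List String)) (c : List String) (hc : c ≠ []) :
    c ∈ pvB_prefixes chains ↔ pvStrict c chains := by
  unfold pvB_prefixes pvStrict
  rw [pv_mem_prefAux]
  constructor
  · rintro (h | ⟨cj, hcj, k, ⟨hk1, hk2⟩, rfl⟩)
    · simp [PySem.Set.empty] at h
    · have hkn : k.toNat < cj.length := by omega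
      refine ⟨cj, hcj, ?_, ?_⟩
      · simpa [List.length_take] using hkn
      · rw [List.length_take, min_eq_left (le_of_lt hkn)]
  · rintro ⟨cj, hcj, hlen, htake⟩
    right
    refine ⟨cj, hcj, (c.length : Int), ⟨?_, by exact_mod_cast hlen⟩, by simpa using htake.symm⟩
    have : 0 < c.length := List.length_pos_of_ne_nil hc
    omega

-- ----- output shapes -----

lemma pv_filterMap_range_getD {α β : Type} (xs : List α) (d : α) (g : α → Option β) :
    (List.range xs.length).filterMap (fun k => g (xs.getD k d)) = xs.filterMap g := by
  induction xs with
  | nil => simp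
  | cons x xs ih =>
    rw [List.length_cons, List.range_succ_eq_map, List.filterMap_cons, List.filterMap_map]
    have h : ((fun k => g ((x :: xs).getD k d)) ∘ Nat.succ) = fun k => g (xs.getD k d) := by
      funext k; simp
    rw [h, ih, List.filterMap_cons]
    simp

-- ===== VERDICT (by name: the statement is the Claim_ definition above) =====
-- a list zipped with its own map is a map of pairs
lemma pv_zip_map (pl : List (List (String × List String))) :
    pl.zip (pl.map pvChain) = pl.map (fun o => (o, pvChain o)) := by
  induction pl with
  | nil => rfl
  | cons a t ih => simp [ih]

theorem filter_max_coverage_propagations_py_spec : Claim_equal_filter_max_coverage_propagations_py := by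
  intro pl _
  unfold Spec_filter_max_coverage_propagations_py
  simp only [filter_max_coverage_propagations_py, filter_max_coverage_propagations_py_alt]
  rw [pv_zip_map pl, List.filterMap_map,
    ← pv_filterMap_range_getD pl []
      ((fun oc => if oc.2 = [] ∨ ¬ (pvB_prefixes (pl.map pvChain)).contains oc.2 = true then some oc.1 else none) ∘
        (fun o => (o, pvChain o)))]
  -- A side: the index comprehension runs over range(len(pl))
  rw [PySem.List.pyRange_zero_natCast pl.length, List.filterMap_map]
  apply List.filterMap_congr
  intro k hkr
  have hk : k < pl.length := List.mem_range.1 hkr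
  simp only [Function.comp_apply, PySem.List.pyGetD_natCast, List.getD_eq_getElem pl [] hk]
  have hiff : ((PySem.List.enumerate (pl.map pvChain) 0).foldl (pvA_step (pl.map pvChain))
        (PySem.Set.ofList (PySem.List.pyRange 0 ((pl.map pvChain).length : Int) 1))).contains (k : Int) = true ↔
      (pvChain (pl[k]'hk) = [] ∨ ¬ (pvB_prefixes (pl.map pvChain)).contains (pvChain (pl[k]'hk)) = true) := by
    simp only [PySem.Set.contains_iff]
    rw [pv_keep_iff pl k hk]
    by_cases hc : pvChain (pl[k]'hk) = []
    · simp [hc]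
    · rw [pvB_mem_iff _ _ hc]
  exact if_congr hiff rfl rfl
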